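-- pv_equiv track=rewrite | github.com/zhelezovartem/graph-utility | graph_utility.py | make_directed_graph
-- ===== SOURCE A (Python) =====
-- def make_directed_graph(nodes_list, edges_list, graph):
--     for node in nodes_list:
--         node_connected_list = []
--         for edge in edges_list:
--             if node == edge[0]:
--                 node_connected_list.append(edge[1])
--         if len(node_connected_list) != 0:
--             graph.update({node: node_connected_list})
--     return graph
-- ===== SOURCE B (Python) =====
-- def make_directed_graph(nodes_list, edges_list, graph):
--     # One pass grouping edges by source, then emit in nodes order (mutates graph like A).
--     adj = {}
--     for src, dst in edges_list:
--         adj.setdefault(src, []).append(dst)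
--     for node in nodes_list:
--         if node in adj:
--             graph[node] = adj[node]
--     return graph
-- ===== Notes on version B (the rewrite author's own statement) =====
-- stated objective: faster
-- what changed: Replaces the nested scan (for each node, scan all edges) by a single pass that groups edges by source into a dict, then emits entries in nodes order.
import Mathlib
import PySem

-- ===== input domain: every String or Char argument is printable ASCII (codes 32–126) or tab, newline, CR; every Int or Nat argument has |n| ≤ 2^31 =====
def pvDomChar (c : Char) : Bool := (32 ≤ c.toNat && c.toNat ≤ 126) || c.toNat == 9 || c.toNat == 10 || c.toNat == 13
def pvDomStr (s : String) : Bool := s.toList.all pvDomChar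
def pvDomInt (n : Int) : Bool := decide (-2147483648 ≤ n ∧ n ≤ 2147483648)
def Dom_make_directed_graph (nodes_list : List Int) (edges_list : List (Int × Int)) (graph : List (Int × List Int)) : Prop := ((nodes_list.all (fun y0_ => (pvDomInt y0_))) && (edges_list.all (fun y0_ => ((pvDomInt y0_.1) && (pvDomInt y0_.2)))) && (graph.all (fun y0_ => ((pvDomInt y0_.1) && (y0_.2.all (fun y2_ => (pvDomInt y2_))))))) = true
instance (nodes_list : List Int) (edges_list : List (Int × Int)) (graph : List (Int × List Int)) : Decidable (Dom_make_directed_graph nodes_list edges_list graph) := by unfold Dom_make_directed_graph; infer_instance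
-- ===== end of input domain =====

-- B groups edges by source in a single pass into a dict, then emits in nodes order
-- (O(N+E) instead of A's O(N*E)); both mutate `graph` in Python the same way, and the
-- theorem is about the returned value.


-- Shared dict primitives on the association-list encoding of a Python dict
-- (exact Python semantics: lookup = first match; assignment overwrites in place, new keys append).
def pyLookup (g : List (Int × List Int)) (k : Int) : Option (List Int) :=
  (g.find? (fun p => p.1 == k)).map Prod.snd

def pyDictSet (g : List (Int × List Int)) (k : Int) (v : List Int) : List (Int × List Int) :=
  if g.any (fun p => p.1 == k) then g.map (fun p => if p.1 == k then (k, v) else p)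
  else g ++ [(k, v)]

-- ===== PORT A =====
def make_directed_graph (nodes_list : List Int) (edges_list : List (Int × Int)) (graph : List (Int × List Int)) : List (Int × List Int) :=
  nodes_list.foldl (fun g node =>
    let node_connected_list :=
      edges_list.foldl (fun acc edge => if node == edge.1 then acc ++ [edge.2] else acc) []
    if node_connected_list.length ≠ 0 then pyDictSet g node node_connected_list else g) graph

-- ===== PORT B =====
def make_directed_graph_alt (nodes_list : List Int) (edges_list : List (Int × Int)) (graph : List (Int × List Int)) : List (Int × List Int) :=
  -- adj.setdefault(src, []).append(dst) = adj[src] = adj.get(src, []) + [dst]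
  let adj := edges_list.foldl
    (fun a e => pyDictSet a e.1 ((pyLookup a e.1).getD [] ++ [e.2])) []
  nodes_list.foldl (fun g node =>
    match pyLookup adj node with
    | some l => pyDictSet g node l
    | none => g) graph

-- ===== PRECONDITION & SPEC =====
def Spec_make_directed_graph (nodes_list : List Int) (edges_list : List (Int × Int)) (graph : List (Int × List Int)) (out : List (Int × List Int)) : Prop := out = make_directed_graph_alt nodes_list edges_list graph
instance (nodes_list : List Int) (edges_list : List (Int × Int)) (graph : List (Int × List Int)) (out : List (Int × List Int)) : Decidable (Spec_make_directed_graph nodes_list edges_list graph out) := by unfold Spec_make_directed_graph; infer_instance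

-- ===== CLAIM (what is proved, stated in full; the proofs are below) =====
def Claim_equal_make_directed_graph : Prop := ∀ (nodes_list : List Int) (edges_list : List (Int × Int)) (graph : List (Int × List Int)), Dom_make_directed_graph nodes_list edges_list graph → Spec_make_directed_graph nodes_list edges_list graph (make_directed_graph nodes_list edges_list graph)

-- ===== LEMMAS AND PROOFS =====

-- A's inner collection loop, named for the proofs.
def pvColl (node : Int) (edges : List (Int × Int)) : List Int :=
  edges.foldl (fun acc edge => if node == edge.1 then acc ++ [edge.2] else acc) []

theorem pvColl_acc (node : Int) (edges : List (Int × Int)) (acc : List Int) :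
    edges.foldl (fun acc edge => if node == edge.1 then acc ++ [edge.2] else acc) acc
      = acc ++ pvColl node edges := by
  induction edges generalizing acc with
  | nil => simp [pvColl]
  | cons e es ih =>
    simp only [pvColl, List.foldl_cons]
    by_cases h : (node == e.1) = true
    · simp only [if_pos h, List.nil_append]
      rw [ih, ih [e.2], List.append_assoc]
    · simp only [if_neg h]
      rw [ih, ih []]
      simp

theorem pyLookup_set_self (g : List (Int × List Int)) (k : Int) (v : List Int) :
    pyLookup (pyDictSet g k v) k = some v := by
  unfold pyLookup pyDictSet
  by_cases hc : (g.any fun p => p.1 == k) = true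
  · rw [if_pos hc, List.find?_map]
    have hpred : ((fun p : Int × List Int => p.1 == k) ∘ fun p => if (p.1 == k) = true then (k, v) else p)
        = fun p : Int × List Int => p.1 == k := by
      funext p; by_cases h : (p.1 == k) = true
      · have hpk : p.1 = k := by simpa using h
        simp [hpk]
      · have hpk : ¬ p.1 = k := by simpa using h
        simp [h, hpk]
    rw [hpred]
    obtain ⟨q, hqmem, hq⟩ := List.any_eq_true.mp hc
    have hsome : (List.find? (fun p : Int × List Int => p.1 == k) g).isSome := by
      rw [List.find?_isSome]; exact ⟨q, hqmem, hq⟩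
    obtain ⟨q', hq'⟩ := Option.isSome_iff_exists.mp hsome
    have hq1 : q'.1 = k := by simpa using List.find?_some hq'
    simp [hq', hq1]
  · rw [if_neg hc, List.find?_append]
    have hnone : g.find? (fun p => p.1 == k) = none := by
      rw [List.find?_eq_none]
      intro p hp hpk
      exact hc (List.any_eq_true.mpr ⟨p, hp, hpk⟩)
    simp [hnone]

theorem pyLookup_set_ne (g : List (Int × List Int)) (k k' : Int) (v : List Int)
    (h : k' ≠ k) : pyLookup (pyDictSet g k v) k' = pyLookup g k' := by
  unfold pyLookup pyDictSet
  by_cases hc : (g.any fun p => p.1 == k) = true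
  · rw [if_pos hc, List.find?_map]
    have hpred : ((fun p : Int × List Int => p.1 == k') ∘ fun p => if (p.1 == k) = true then (k, v) else p)
        = fun p : Int × List Int => p.1 == k' := by
      funext p; by_cases hp : (p.1 == k) = true
      · have hpk : p.1 = k := by simpa using hp
        simp [hpk]
      · have hpk : ¬ p.1 = k := by simpa using hp
        simp [hpk]
    rw [hpred]
    cases hf : g.find? (fun p => p.1 == k') with
    | none => simp
    | some q =>
      have hq1 : q.1 = k' := by simpa using List.find?_some hf
      simp [hq1, h]
  · rw [if_neg hc, List.find?_append]
    cases hf : g.find? (fun p => p.1 == k') with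
    | none =>
      have hkk : (k == k') = false := by simpa using Ne.symm h
      simp [List.find?, hkk]
    | some q => simp

-- Characterisation of B's adjacency-dict lookup in terms of A's per-node collection.
theorem pvAdj_lookup (edges : List (Int × Int)) (a : List (Int × List Int)) (node : Int) :
    pyLookup (edges.foldl (fun a e => pyDictSet a e.1 ((pyLookup a e.1).getD [] ++ [e.2])) a) node
      = match pyLookup a node with
        | some l => some (l ++ pvColl node edges)
        | none => if pvColl node edges = [] then none else some (pvColl node edges) := by
  induction edges generalizing a with
  | nil => cases h : pyLookup a node <;> simp [pvColl, h]
  | cons e es ih =>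
    simp only [List.foldl_cons]
    rw [ih]
    have hstep : pvColl node (e :: es)
        = (if (node == e.1) = true then [e.2] else []) ++ pvColl node es := by
      simp only [pvColl, List.foldl_cons]
      by_cases hb : (node == e.1) = true
      · rw [if_pos hb, if_pos hb]
        have := pvColl_acc node es [e.2]
        simpa [pvColl] using this
      · rw [if_neg hb, if_neg hb]; simp
    by_cases h : node = e.1
    · rw [h] at hstep ⊢
      rw [pyLookup_set_self]
      simp only [beq_self_eq_true, if_true] at hstep
      cases hl : pyLookup a e.1 with
      | none => simp [hstep]
      | some l => simp [hstep]
    · have hb : (node == e.1) = false := by simp [h]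
      rw [pyLookup_set_ne _ _ _ _ h, hstep, hb]
      simp

-- The two node-folds agree (B's adjacency dict reproduces A's per-node collection).
theorem pv_fold_eq (edges_list : List (Int × Int)) (nodes : List Int)
    (graph : List (Int × List Int)) :
    nodes.foldl (fun g node =>
        let node_connected_list :=
          edges_list.foldl (fun acc edge => if node == edge.1 then acc ++ [edge.2] else acc) []
        if node_connected_list.length ≠ 0 then pyDictSet g node node_connected_list else g) graph
    = nodes.foldl (fun g node =>
        match pyLookup (edges_list.foldl
            (fun a e => pyDictSet a e.1 ((pyLookup a e.1).getD [] ++ [e.2])) []) node with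
        | some l => pyDictSet g node l
        | none => g) graph := by
  induction nodes generalizing graph with
  | nil => rfl
  | cons n ns ih =>
    simp only [List.foldl_cons]
    have hadj := pvAdj_lookup edges_list [] n
    have hnil : pyLookup [] n = none := rfl
    rw [hnil] at hadj
    simp only at hadj
    rw [ih]
    congr 1
    show (if (pvColl n edges_list).length ≠ 0 then pyDictSet graph n (pvColl n edges_list) else graph)
      = _
    by_cases hc : pvColl n edges_list = []
    · rw [if_pos hc] at hadj
      rw [hadj, hc]
      simp
    · rw [if_neg hc] at hadj
      rw [hadj]
      rw [if_pos (by simpa [List.length_eq_zero_iff] using hc)]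

-- ===== VERDICT (by name: the statement is the Claim_ definition above) =====
theorem make_directed_graph_spec : Claim_equal_make_directed_graph := by
  intro nodes_list edges_list graph _
  unfold Spec_make_directed_graph make_directed_graph make_directed_graph_alt
  exact pv_fold_eq edges_list nodes_list graph
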